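-- pv_equiv track=rewrite | github.com/rudi193-cmd/willow-1.4 | core/breath.py | next_exhale_wait_ms
-- ===== SOURCE A (Python) =====
-- PHASES = [
--     {"name": "inhale",   "ms": 3000, "index": 0},
--     {"name": "hold",     "ms": 3000, "index": 1},
--     {"name": "exhale",   "ms": 4000, "index": 2},
--     {"name": "hold_out", "ms": 4000, "index": 3},
--     {"name": "rest",     "ms": 3000, "index": 4},
-- ]
--
-- CYCLE_MS: int = sum(p["ms"] for p in PHASES)   # 17000ms
--
-- EXHALE_INDEX = 2   # the phase Jane responds on
--
-- def next_exhale_wait_ms(elapsed_ms: int) -> int: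
--     """
--     Milliseconds until the next exhale phase begins.
--
--     If currently in exhale, returns 0 (respond now).
--     Otherwise returns ms until exhale starts.
--
--     Used by Jane: when response is ready, wait this long before surfacing it.
--     """
--     pos = elapsed_ms % CYCLE_MS
--     acc = 0
--     for phase in PHASES:
--         if pos < acc + phase["ms"]:
--             if phase["index"] == EXHALE_INDEX:
--                 return 0  # already in exhale
--             if phase["index"] < EXHALE_INDEX:
--                 # count remaining ms in current phase + all phases until exhale
--                 remaining_current = (acc + phase["ms"]) - pos
--                 between = sum(
--                     p["ms"] for p in PHASES
--                     if phase["index"] < p["index"] < EXHALE_INDEX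
--                 )
--                 return remaining_current + between
--             else:
--                 # past exhale — wait until next cycle's exhale
--                 remaining_cycle = CYCLE_MS - pos
--                 phases_before_exhale = sum(
--                     p["ms"] for p in PHASES if p["index"] < EXHALE_INDEX
--                 )
--                 return remaining_cycle + phases_before_exhale
--         acc += phase["ms"]
--     return 0
-- ===== SOURCE B (Python) =====
-- PHASES = [
--     {"name": "inhale",   "ms": 3000, "index": 0},
--     {"name": "hold",     "ms": 3000, "index": 1},
--     {"name": "exhale",   "ms": 4000, "index": 2},
--     {"name": "hold_out", "ms": 4000, "index": 3},
--     {"name": "rest",     "ms": 3000, "index": 4},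
-- ]
--
-- CYCLE_MS: int = sum(p["ms"] for p in PHASES)   # 17000ms
--
-- EXHALE_INDEX = 2
--
-- # Derived once at load time: start/end of the exhale window within a cycle.
-- EXHALE_START: int = sum(p["ms"] for p in PHASES if p["index"] < EXHALE_INDEX)  # 6000
-- EXHALE_END: int = EXHALE_START + PHASES[EXHALE_INDEX]["ms"]                    # 10000
--
-- def next_exhale_wait_ms(elapsed_ms: int) -> int:
--     pos = elapsed_ms % CYCLE_MS
--     if EXHALE_START <= pos < EXHALE_END:
--         return 0
--     return (EXHALE_START - pos) % CYCLE_MS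
-- ===== Notes on version B (the rewrite author's own statement) =====
-- stated objective: simpler
-- what changed: Replaced the per-call scan over PHASES (with inner sum() passes) by a closed form: load-time constants EXHALE_START/EXHALE_END and a single modular-distance expression (EXHALE_START - pos) % CYCLE_MS.
import Mathlib
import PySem

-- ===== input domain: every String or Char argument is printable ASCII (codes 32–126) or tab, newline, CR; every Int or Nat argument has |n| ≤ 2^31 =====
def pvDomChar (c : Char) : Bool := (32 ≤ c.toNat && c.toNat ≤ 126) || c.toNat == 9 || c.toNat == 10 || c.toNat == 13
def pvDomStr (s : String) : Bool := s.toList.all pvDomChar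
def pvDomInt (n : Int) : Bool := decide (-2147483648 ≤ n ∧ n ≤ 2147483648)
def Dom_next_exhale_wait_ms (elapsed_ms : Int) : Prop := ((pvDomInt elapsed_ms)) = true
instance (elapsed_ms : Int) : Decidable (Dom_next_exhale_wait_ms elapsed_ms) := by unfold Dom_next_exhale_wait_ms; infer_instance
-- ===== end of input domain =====

-- B: closed form with load-time constants instead of a per-call scan over PHASES; same return value.

-- ===== PORT A =====
-- Phases as (name, ms, index) triples, as in Source A
def pvPhases : List (String × Int × Int) :=
  [("inhale", 3000, 0), ("hold", 3000, 1), ("exhale", 4000, 2),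
   ("hold_out", 4000, 3), ("rest", 3000, 4)]

def pvCycleMs : Int := (pvPhases.map (fun p => p.2.1)).sum

def pvExhaleIndex : Int := 2

-- the for-loop of A, carrying acc
def pvLoopA (pos : Int) (acc : Int) (phases : List (String × Int × Int)) : Int :=
  match phases with
  | [] => 0
  | phase :: rest =>
    if pos < acc + phase.2.1 then
      if phase.2.2 = pvExhaleIndex then 0
      else if phase.2.2 < pvExhaleIndex then
        let remaining_current := (acc + phase.2.1) - pos
        let between := ((pvPhases.filter (fun p => phase.2.2 < p.2.2 ∧ p.2.2 < pvExhaleIndex)).map (fun p => p.2.1)).sum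
        remaining_current + between
      else
        let remaining_cycle := pvCycleMs - pos
        let phases_before_exhale := ((pvPhases.filter (fun p => p.2.2 < pvExhaleIndex)).map (fun p => p.2.1)).sum
        remaining_cycle + phases_before_exhale
    else pvLoopA pos (acc + phase.2.1) rest

def next_exhale_wait_ms (elapsed_ms : Int) : Int :=
  pvLoopA (PySem.Int.mod elapsed_ms pvCycleMs) 0 pvPhases

-- ===== PORT B =====
def pvExhaleStart : Int := ((pvPhases.filter (fun p => p.2.2 < pvExhaleIndex)).map (fun p => p.2.1)).sum
def pvExhaleEnd : Int := pvExhaleStart + (pvPhases.getD 2 ("", 0, 0)).2.1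

def next_exhale_wait_ms_alt (elapsed_ms : Int) : Int :=
  let pos := PySem.Int.mod elapsed_ms pvCycleMs
  if pvExhaleStart ≤ pos ∧ pos < pvExhaleEnd then 0
  else PySem.Int.mod (pvExhaleStart - pos) pvCycleMs

-- ===== PRECONDITION & SPEC =====
def Spec_next_exhale_wait_ms (elapsed_ms : Int) (out : Int) : Prop := out = next_exhale_wait_ms_alt elapsed_ms
instance (elapsed_ms : Int) (out : Int) : Decidable (Spec_next_exhale_wait_ms elapsed_ms out) := by unfold Spec_next_exhale_wait_ms; infer_instance

-- ===== CLAIM (what is proved, stated in full; the proofs are below) =====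
def Claim_equal_next_exhale_wait_ms : Prop := ∀ (elapsed_ms : Int), Dom_next_exhale_wait_ms elapsed_ms → Spec_next_exhale_wait_ms elapsed_ms (next_exhale_wait_ms elapsed_ms)

-- ===== LEMMAS AND PROOFS =====

-- ===== VERDICT (by name: the statement is the Claim_ definition above) =====
theorem pvAgree (e : Int) : next_exhale_wait_ms e = next_exhale_wait_ms_alt e := by
  have h17 : (0:Int) < 17000 := by norm_num
  have hcyc : pvCycleMs = 17000 := by decide
  simp only [next_exhale_wait_ms, next_exhale_wait_ms_alt, hcyc,
    PySem.Int.mod_eq_emod_of_pos h17]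
  have hb1 : 0 ≤ e % 17000 := Int.emod_nonneg e (by norm_num)
  have hb2 : e % 17000 < 17000 := Int.emod_lt_of_pos e h17
  generalize hp : e % 17000 = pos at hb1 hb2 ⊢
  simp only [pvLoopA, pvPhases, pvExhaleIndex, pvCycleMs, pvExhaleStart, pvExhaleEnd,
    List.filter, List.map, List.sum, List.getD]
  norm_num
  split_ifs <;> omega

theorem next_exhale_wait_ms_spec : Claim_equal_next_exhale_wait_ms := by
  intro e _
  unfold Spec_next_exhale_wait_ms
  exact pvAgree e
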